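-- pv_equiv track=rewrite | github.com/aarneranta/python-course-gbg | summer-2020/QAs_Ruben/c4.py | four_in_a_row
-- ===== SOURCE A (Python) =====
-- def four_in_a_row(it):
--     last = None
--     seen = 0
--     for el in it:
--         if el == last:
--             seen += 1
--         else:
--             last = el
--             seen = 1
--         if seen >= 4:
--             return last
--     return None
-- ===== SOURCE B (Python) =====
-- def four_in_a_row(it):
--     xs = list(it)
--     for i in range(len(xs) - 3):
--         if xs[i] == xs[i + 1] == xs[i + 2] == xs[i + 3]:
--             return xs[i]
--     return None
-- ===== Notes on version B (the rewrite author's own statement) =====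
-- stated objective: alternative
-- what changed: Replaces A's running last/seen counter state machine with a stateless positional sliding-window scan: materialise the list, then for each index i compare the four adjacent elements xs[i..i+3] and return xs[i] at the first all-equal window.
import Mathlib
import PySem

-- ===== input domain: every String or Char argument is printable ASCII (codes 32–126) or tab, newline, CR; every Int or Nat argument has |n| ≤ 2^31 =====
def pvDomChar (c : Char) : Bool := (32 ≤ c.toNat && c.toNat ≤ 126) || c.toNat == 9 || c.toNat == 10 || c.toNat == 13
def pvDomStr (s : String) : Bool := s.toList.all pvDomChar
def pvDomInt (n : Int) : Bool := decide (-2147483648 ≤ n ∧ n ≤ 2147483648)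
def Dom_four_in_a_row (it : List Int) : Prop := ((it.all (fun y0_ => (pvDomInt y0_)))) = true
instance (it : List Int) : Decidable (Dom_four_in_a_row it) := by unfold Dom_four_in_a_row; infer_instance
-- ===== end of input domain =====

-- B replaces A's last/seen run-counter state machine with a stateless sliding-window
-- index scan comparing four adjacent elements (alternative decomposition; same O(n) cost).


-- ===== PORT A =====
-- A's loop with state (last, seen); `el == last` with last = None is False in Python,
-- modelled by comparing against an Option Int.
def fiarLoop : List Int → Option Int → Int → Option Int
  | [], _, _ => none
  | el :: rest, last, seen =>
    let p := if some el = last then (last, seen + 1) else (some el, (1 : Int))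
    if p.2 ≥ 4 then p.1 else fiarLoop rest p.1 p.2

def four_in_a_row (it : List Int) : Option Int := fiarLoop it none 0

-- ===== PORT B =====
-- Source B's `for i in range(len(xs)-3): if …: return xs[i]` as findSome? over the range;
-- every index i, i+1, i+2, i+3 touched is in range (i < len-3), so getD is exact here.
def four_in_a_row_alt (it : List Int) : Option Int :=
  (List.range (it.length - 3)).findSome? fun i =>
    if it.getD i 0 = it.getD (i + 1) 0 ∧ it.getD (i + 1) 0 = it.getD (i + 2) 0 ∧
       it.getD (i + 2) 0 = it.getD (i + 3) 0
    then some (it.getD i 0) else none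

-- ===== PRECONDITION & SPEC =====
def Spec_four_in_a_row (it : List Int) (out : Option Int) : Prop := out = four_in_a_row_alt it
instance (it : List Int) (out : Option Int) : Decidable (Spec_four_in_a_row it out) := by unfold Spec_four_in_a_row; infer_instance

-- ===== CLAIM (what is proved, stated in full; the proofs are below) =====
def Claim_equal_four_in_a_row : Prop := ∀ (it : List Int), Dom_four_in_a_row it → Spec_four_in_a_row it (four_in_a_row it)

-- ===== LEMMAS AND PROOFS =====
-- Proof-side canonical form: recursion on suffixes, checking the leading window of 4.
def fiarWin : List Int → Option Int
  | a :: b :: c :: d :: rest => if a = b ∧ b = c ∧ c = d then some a else fiarWin (b :: c :: d :: rest)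
  | _ => none
termination_by l => l.length
decreasing_by simp

theorem alt_eq_win : ∀ xs : List Int, four_in_a_row_alt xs = fiarWin xs
  | [] => by simp [four_in_a_row_alt, fiarWin]
  | [a] => by simp [four_in_a_row_alt, fiarWin]
  | [a, b] => by simp [four_in_a_row_alt, fiarWin]
  | [a, b, c] => by simp [four_in_a_row_alt, fiarWin]
  | a :: b :: c :: d :: rest => by
    have ih := alt_eq_win (b :: c :: d :: rest)
    simp only [four_in_a_row_alt] at ih ⊢
    have hlen : (a :: b :: c :: d :: rest).length - 3 = ((b :: c :: d :: rest).length - 3) + 1 := by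
      simp
    rw [hlen, List.range_succ_eq_map, List.findSome?_cons, List.findSome?_map]
    simp only [List.getD_cons_zero, List.getD_cons_succ, Function.comp_def,
      Nat.succ_eq_add_one] at ih ⊢
    by_cases h : a = b ∧ b = c ∧ c = d
    · rw [if_pos h]
      conv_rhs => rw [fiarWin]
      rw [if_pos h]
    · rw [if_neg h, ih]
      conv_rhs => rw [fiarWin]
      rw [if_neg h]
termination_by xs => xs.length

theorem win_skip1 {x y : Int} (h : x ≠ y) : ∀ l : List Int, fiarWin (x :: y :: l) = fiarWin (y :: l)
  | [] => by simp [fiarWin]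
  | [c] => by simp [fiarWin]
  | c :: d :: l' => by
    conv_lhs => rw [fiarWin]
    rw [if_neg (by tauto)]

theorem win_skip2 {x y : Int} (h : x ≠ y) : ∀ l : List Int, fiarWin (x :: x :: y :: l) = fiarWin (y :: l)
  | [] => by simp [fiarWin]
  | c :: l' => by
    conv_lhs => rw [fiarWin]
    rw [if_neg (by tauto), win_skip1 h]

theorem win_skip3 {x y : Int} (h : x ≠ y) (l : List Int) :
    fiarWin (x :: x :: x :: y :: l) = fiarWin (y :: l) := by
  conv_lhs => rw [fiarWin]
  rw [if_neg (by tauto), win_skip2 h]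

theorem fiarLoop_win (l : List Int) : ∀ (x : Int) (k : Nat), 1 ≤ k → k ≤ 3 →
    fiarLoop l (some x) (k : Int) = fiarWin (List.replicate k x ++ l) := by
  induction l with
  | nil =>
    intro x k h1 h3
    interval_cases k <;> simp [fiarLoop, fiarWin]
  | cons y ys ih =>
    intro x k h1 h3
    by_cases hyx : y = x
    · subst hyx
      have e1 : fiarLoop (y :: ys) (some y) (k : Int) =
          if (k : Int) + 1 ≥ 4 then some y else fiarLoop ys (some y) ((k : Int) + 1) := by
        simp [fiarLoop]
      rw [e1]
      by_cases hk : k = 3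
      · subst hk
        rw [if_pos (by norm_num)]
        simp [fiarWin, List.replicate]
      · rw [if_neg (by omega)]
        have : ((k : Int) + 1) = ((k + 1 : Nat) : Int) := by push_cast; ring
        rw [this, ih y (k + 1) (by omega) (by omega)]
        congr 1
        simp [List.replicate_succ', List.append_assoc]
    · have e1 : fiarLoop (y :: ys) (some x) (k : Int) = fiarLoop ys (some y) 1 := by
        simp [fiarLoop, hyx]
      have hxy : x ≠ y := fun h => hyx h.symm
      have : (1 : Int) = ((1 : Nat) : Int) := by norm_num
      rw [e1, this, ih y 1 (by omega) (by omega)]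
      simp only [List.replicate, List.singleton_append]
      interval_cases k
      · exact (win_skip1 hxy ys).symm
      · exact (win_skip2 hxy ys).symm
      · exact (win_skip3 hxy ys).symm

theorem fiar_eq_alt (it : List Int) : four_in_a_row it = four_in_a_row_alt it := by
  rw [alt_eq_win]
  cases it with
  | nil => simp [four_in_a_row, fiarLoop, fiarWin]
  | cons x xs =>
    show fiarLoop (x :: xs) none 0 = _
    simp only [fiarLoop, reduceCtorEq, if_false]
    rw [if_neg (by norm_num)]
    have : (1 : Int) = ((1 : Nat) : Int) := by norm_num
    rw [this, fiarLoop_win xs x 1 (by omega) (by omega)]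
    simp [List.replicate]

-- ===== VERDICT (by name: the statement is the Claim_ definition above) =====
theorem four_in_a_row_spec : Claim_equal_four_in_a_row := by
  intro it _
  exact fiar_eq_alt it
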